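-- pv_equiv track=rewrite | github.com/jucollas/ADA | hw03/_programs/_other/bst2.py | phi
-- ===== SOURCE A (Python) =====
-- def phi(r, l, h):
--   if r == l:
--     ans = []
--   elif r == l - 1:
--     ans = [ r ]
--   else:
--     md = max(r, l - int(2**h))
--     ans = [ md ] + phi(r, md, h - 1) + phi(md + 1, l, h - 1)
--   return ans
-- ===== SOURCE B (Python) =====
-- def phi(r, l, h):
--     ans = []
--     stack = [(r, l, h)]
--     while stack:
--         r, l, h = stack.pop()
--         if r == l:
--             continue
--         if r == l - 1:
--             ans.append(r)
--             continue
--         md = max(r, l - int(2**h))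
--         ans.append(md)
--         stack.append((md + 1, l, h - 1))
--         stack.append((r, md, h - 1))
--     return ans
-- ===== Notes on version B (the rewrite author's own statement) =====
-- stated objective: alternative
-- what changed: Replaces A's recursion, which assembles the result by concatenating the sublists of its two recursive calls at every node, with an iterative explicit worklist of (r, l, h) triples and a single append-only result list (right child pushed before left to preserve preorder).
import Mathlib
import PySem

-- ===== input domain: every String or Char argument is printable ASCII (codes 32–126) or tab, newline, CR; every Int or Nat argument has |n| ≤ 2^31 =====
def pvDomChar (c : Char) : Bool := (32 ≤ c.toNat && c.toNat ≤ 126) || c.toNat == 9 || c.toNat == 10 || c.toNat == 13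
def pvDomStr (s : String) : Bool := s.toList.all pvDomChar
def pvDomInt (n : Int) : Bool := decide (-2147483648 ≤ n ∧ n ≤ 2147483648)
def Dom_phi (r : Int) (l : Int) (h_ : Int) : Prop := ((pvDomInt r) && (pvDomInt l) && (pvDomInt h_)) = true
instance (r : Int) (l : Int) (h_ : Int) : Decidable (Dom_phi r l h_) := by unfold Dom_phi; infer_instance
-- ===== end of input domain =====

-- B replaces A's recursion (which rebuilds the answer with list concatenations) by an
-- explicit worklist of (r, l, h) triples and a single append-only result list.

-- ===== PORT A =====
-- int(2**h): for h ≥ 0 Python gives the exact integer 2^h; for h < 0 it gives the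
-- float 2.0**h < 1, which int() truncates to 0.  Exact on all Int inputs.
def pvPow2 (h_ : Int) : Int := if 0 ≤ h_ then (2:Int) ^ h_.toNat else 0

-- A's recursion diverges on some inputs (e.g. r > l), so the port carries a Nat fuel
-- bounding the recursion depth; fuel h_.toNat + 2 is exact on Pre_phi (proved below).
def phiFuel : Nat → Int → Int → Int → List Int
  | 0, _, _, _ => []
  | fuel+1, r, l, h_ =>
    if r = l then []
    else if r = l - 1 then [r]
    else
      let md := max r (l - pvPow2 h_)
      [md] ++ phiFuel fuel r md (h_ - 1) ++ phiFuel fuel (md + 1) l (h_ - 1)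

def phi (r : Int) (l : Int) (h_ : Int) : List Int := phiFuel (h_.toNat + 2) r l h_

-- ===== PORT B =====
-- Source B's while-loop over the stack; the Nat fuel bounds the number of loop iterations
-- (the Python loop runs forever exactly where A diverges); 2*(l-r).toNat + 2
-- iterations are exact on Pre_phi (proved below).
def phiAltGo : Nat → List (Int × Int × Int) → List Int → List Int
  | 0, _, ans => ans
  | _+1, [], ans => ans
  | fuel+1, (r, l, h_) :: st, ans =>
    if r = l then phiAltGo fuel st ans
    else if r = l - 1 then phiAltGo fuel st (ans ++ [r])
    else
      let md := max r (l - pvPow2 h_)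
      phiAltGo fuel ((r, md, h_ - 1) :: (md + 1, l, h_ - 1) :: st) (ans ++ [md])

def phi_alt (r : Int) (l : Int) (h_ : Int) : List Int :=
  phiAltGo (2 * (l - r).toNat + 2) [(r, l, h_)] []

-- ===== PRECONDITION & SPEC =====
-- Pre_phi excludes exactly the inputs on which A recurses forever (RecursionError):
-- A terminates iff r ≤ l and the interval size l - r either is ≤ 1 or fits in a BST
-- of height h_ + 1, i.e. 0 ≤ h_ and l - r ≤ 2^(h_+1).
def Pre_phi (r : Int) (l : Int) (h_ : Int) : Prop :=
  r ≤ l ∧ (l - r ≤ 1 ∨ (0 ≤ h_ ∧ l - r ≤ (2:Int) ^ (h_.toNat + 1)))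
instance (r : Int) (l : Int) (h_ : Int) : Decidable (Pre_phi r l h_) := by
  unfold Pre_phi; infer_instance

def pvWitness_phi : Int × Int × Int := (0, 4, 2)

def Spec_phi (r : Int) (l : Int) (h_ : Int) (out : List Int) : Prop := out = phi_alt r l h_
instance (r : Int) (l : Int) (h_ : Int) (out : List Int) : Decidable (Spec_phi r l h_ out) := by
  unfold Spec_phi; infer_instance

-- ===== CLAIM (what is proved, stated in full; the proofs are below) =====
def Claim_equal_phi : Prop :=
  ∀ (r : Int) (l : Int) (h_ : Int), Dom_phi r l h_ → Pre_phi r l h_ → Spec_phi r l h_ (phi r l h_)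

-- ===== LEMMAS AND PROOFS =====

-- recursion depth A actually needs on Pre_phi
def pvDep (r : Int) (l : Int) (h_ : Int) : Nat := if l - r ≤ 1 then 1 else h_.toNat + 2

-- loop-iteration budget of one stack entry
def pvCost : Int × Int × Int → Nat
  | (r, l, _) => 2 * (l - r).toNat + 1

lemma phiFuel_succ (f : Nat) (r l h_ : Int) (h1 : ¬ r = l) (h2 : ¬ r = l - 1) :
    phiFuel (f + 1) r l h_ = [max r (l - pvPow2 h_)]
      ++ phiFuel f r (max r (l - pvPow2 h_)) (h_ - 1)
      ++ phiFuel f (max r (l - pvPow2 h_) + 1) l (h_ - 1) := by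
  simp only [phiFuel]; rw [if_neg h1, if_neg h2]

lemma phiAltGo_nil (f : Nat) (ans : List Int) : phiAltGo f [] ans = ans := by
  cases f <;> rfl

lemma phiAltGo_cons0 (f : Nat) (r l h_ : Int) (st : List (Int × Int × Int)) (ans : List Int)
    (h1 : r = l) : phiAltGo (f + 1) ((r, l, h_) :: st) ans = phiAltGo f st ans := by
  simp only [phiAltGo]; rw [if_pos h1]

lemma phiAltGo_cons1 (f : Nat) (r l h_ : Int) (st : List (Int × Int × Int)) (ans : List Int)
    (h1 : ¬ r = l) (h2 : r = l - 1) :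
    phiAltGo (f + 1) ((r, l, h_) :: st) ans = phiAltGo f st (ans ++ [r]) := by
  simp only [phiAltGo]; rw [if_neg h1, if_pos h2]

lemma phiAltGo_cons2 (f : Nat) (r l h_ : Int) (st : List (Int × Int × Int)) (ans : List Int)
    (h1 : ¬ r = l) (h2 : ¬ r = l - 1) :
    phiAltGo (f + 1) ((r, l, h_) :: st) ans
      = phiAltGo f ((r, max r (l - pvPow2 h_), h_ - 1)
          :: (max r (l - pvPow2 h_) + 1, l, h_ - 1) :: st) (ans ++ [max r (l - pvPow2 h_)]) := by
  simp only [phiAltGo]; rw [if_neg h1, if_neg h2]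

lemma pvPre_children (r l h_ : Int) (hp : Pre_phi r l h_) (h1 : ¬ r = l) (h2 : ¬ r = l - 1) :
    0 ≤ h_ ∧ r ≤ max r (l - pvPow2 h_) ∧ max r (l - pvPow2 h_) ≤ l - 1 ∧
      Pre_phi r (max r (l - pvPow2 h_)) (h_ - 1) ∧
      Pre_phi (max r (l - pvPow2 h_) + 1) l (h_ - 1) := by
  obtain ⟨hrl, hcase⟩ := hp
  have hn : 2 ≤ l - r := by omega
  have hh : 0 ≤ h_ ∧ l - r ≤ (2:Int) ^ (h_.toNat + 1) := by
    rcases hcase with h | h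
    · omega
    · exact h
  obtain ⟨hh0, hsz⟩ := hh
  have hpow : pvPow2 h_ = (2:Int) ^ h_.toNat := by simp [pvPow2, hh0]
  have hp1 : (1:Int) ≤ (2:Int) ^ h_.toNat := one_le_pow₀ (by norm_num)
  have hp2 : (2:Int) ^ (h_.toNat + 1) = 2 * (2:Int) ^ h_.toNat := by ring
  set p := (2:Int) ^ h_.toNat with hpdef
  have hsz' : l - r ≤ 2 * p := by rw [← hp2]; exact hsz
  have hone : h_ = 0 → p = 1 := by intro h0; rw [hpdef, h0]; simp
  have hmd : max r (l - pvPow2 h_) = max r (l - p) := by rw [hpow]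
  rw [hmd]
  rcases le_total r (l - p) with hc | hc
  · -- md = l - p
    rw [max_eq_right hc]
    refine ⟨hh0, by omega, by omega, ?_, ?_⟩
    · -- left child (r, l - p, h_ - 1): size l - p - r ≤ p
      refine ⟨by omega, ?_⟩
      by_cases h0 : h_ = 0
      · left; have := hone h0; omega
      · right
        have he : (h_ - 1).toNat + 1 = h_.toNat := by omega
        refine ⟨by omega, ?_⟩
        rw [he]; omega
    · -- right child (l - p + 1, l, h_ - 1): size p - 1 ≤ p
      refine ⟨by omega, ?_⟩
      by_cases h0 : h_ = 0
      · left; have := hone h0; omega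
      · right
        have he : (h_ - 1).toNat + 1 = h_.toNat := by omega
        refine ⟨by omega, ?_⟩
        rw [he]; omega
  · -- md = r
    rw [max_eq_left hc]
    refine ⟨hh0, le_refl r, by omega, ⟨le_refl r, Or.inl (by omega)⟩, ?_⟩
    refine ⟨by omega, ?_⟩
    by_cases h0 : h_ = 0
    · left; have := hone h0; omega
    · right
      have he : (h_ - 1).toNat + 1 = h_.toNat := by omega
      refine ⟨by omega, ?_⟩
      rw [he]; omega

lemma phiFuel_irrel : ∀ (f g : Nat) (r l h_ : Int), Pre_phi r l h_ →
    pvDep r l h_ ≤ f → pvDep r l h_ ≤ g → phiFuel f r l h_ = phiFuel g r l h_ := by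
  intro f
  induction f with
  | zero => intro g r l h_ _ hf _; simp only [pvDep] at hf; split at hf <;> omega
  | succ f ih =>
    intro g r l h_ hp hf hg
    have hg1 : 1 ≤ g := by simp only [pvDep] at hg; split at hg <;> omega
    obtain ⟨g', rfl⟩ : ∃ g', g = g' + 1 := ⟨g - 1, by omega⟩
    by_cases h1 : r = l
    · show (if r = l then _ else _) = (if r = l then _ else _)
      rw [if_pos h1, if_pos h1]
    by_cases h2 : r = l - 1
    · show (if r = l then _ else _) = (if r = l then _ else _)
      rw [if_neg h1, if_neg h1]
      simp only [if_pos h2]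
    obtain ⟨hh0, hml, hmu, hpl, hpr⟩ := pvPre_children r l h_ hp h1 h2
    have hdep : pvDep r l h_ = h_.toNat + 2 := by
      have hgt : ¬ l - r ≤ 1 := by omega
      simp only [pvDep]; rw [if_neg hgt]
    rw [hdep] at hf hg
    have hkey : ∀ (r' l' k : Int), Pre_phi r' l' k → k = h_ - 1 →
        phiFuel f r' l' k = phiFuel g' r' l' k := by
      intro r' l' k hp' hk
      apply ih g' r' l' k hp'
      all_goals {
        by_cases hs : l' - r' ≤ 1
        · simp only [pvDep]; rw [if_pos hs]; omega
        · have hk0 : 0 ≤ k := by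
            rcases hp'.2 with h | h
            · omega
            · exact h.1
          simp only [pvDep]; rw [if_neg hs]; omega }
    rw [phiFuel_succ f r l h_ h1 h2, phiFuel_succ g' r l h_ h1 h2,
        hkey r (max r (l - pvPow2 h_)) (h_ - 1) hpl rfl,
        hkey (max r (l - pvPow2 h_) + 1) l (h_ - 1) hpr rfl]

lemma phi_nil (r l h_ : Int) (h1 : r = l) : phi r l h_ = [] := by
  simp [phi, phiFuel, h1]

lemma phi_single (r l h_ : Int) (h1 : ¬ r = l) (h2 : r = l - 1) : phi r l h_ = [r] := by
  show (if r = l then _ else _) = _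
  rw [if_neg h1, if_pos h2]

lemma phi_unfold (r l h_ : Int) (hp : Pre_phi r l h_) (h1 : ¬ r = l) (h2 : ¬ r = l - 1) :
    phi r l h_ = [max r (l - pvPow2 h_)] ++ phi r (max r (l - pvPow2 h_)) (h_ - 1)
      ++ phi (max r (l - pvPow2 h_) + 1) l (h_ - 1) := by
  obtain ⟨hh0, hml, hmu, hpl, hpr⟩ := pvPre_children r l h_ hp h1 h2
  have hstep : phi r l h_ = [max r (l - pvPow2 h_)]
      ++ phiFuel (h_.toNat + 1) r (max r (l - pvPow2 h_)) (h_ - 1)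
      ++ phiFuel (h_.toNat + 1) (max r (l - pvPow2 h_) + 1) l (h_ - 1) :=
    phiFuel_succ (h_.toNat + 1) r l h_ h1 h2
  rw [hstep]
  have hdep : ∀ (r' l' : Int), Pre_phi r' l' (h_ - 1) →
      pvDep r' l' (h_ - 1) ≤ h_.toNat + 1 ∧ pvDep r' l' (h_ - 1) ≤ (h_ - 1).toNat + 2 := by
    intro r' l' hp'
    by_cases hs : l' - r' ≤ 1
    · simp only [pvDep]; rw [if_pos hs]; omega
    · have hk0 : 0 ≤ h_ - 1 := by
        rcases hp'.2 with h | h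
        · omega
        · exact h.1
      simp only [pvDep]; rw [if_neg hs]; omega
  obtain ⟨ha1, ha2⟩ := hdep r (max r (l - pvPow2 h_)) hpl
  obtain ⟨hb1, hb2⟩ := hdep (max r (l - pvPow2 h_) + 1) l hpr
  rw [phiFuel_irrel _ _ _ _ _ hpl ha1 ha2, phiFuel_irrel _ _ _ _ _ hpr hb1 hb2]
  rfl

lemma phiAltGo_eq : ∀ (f : Nat) (st : List (Int × Int × Int)) (ans : List Int),
    (∀ t ∈ st, Pre_phi t.1 t.2.1 t.2.2) → (st.map pvCost).sum ≤ f →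
    phiAltGo f st ans = ans ++ (st.map (fun t => phi t.1 t.2.1 t.2.2)).flatten := by
  intro f
  induction f with
  | zero =>
    intro st ans hok hc
    cases st with
    | nil => simp [phiAltGo_nil]
    | cons t st => exfalso; obtain ⟨r, l, h_⟩ := t; simp only [List.map_cons, List.sum_cons, pvCost] at hc; omega
  | succ f ih =>
    intro st ans hok hc
    cases st with
    | nil => simp [phiAltGo_nil]
    | cons t st =>
      obtain ⟨r, l, h_⟩ := t
      have hpt : Pre_phi r l h_ := hok (r, l, h_) (by simp)
      have hok' : ∀ t ∈ st, Pre_phi t.1 t.2.1 t.2.2 := fun t ht => hok t (by simp [ht])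
      by_cases h1 : r = l
      · rw [phiAltGo_cons0 f r l h_ st ans h1,
            ih st ans hok' (by simp only [List.map_cons, List.sum_cons, pvCost] at hc ⊢; omega)]
        simp [phi_nil r l h_ h1]
      by_cases h2 : r = l - 1
      · rw [phiAltGo_cons1 f r l h_ st ans h1 h2,
            ih st (ans ++ [r]) hok' (by simp only [List.map_cons, List.sum_cons, pvCost] at hc ⊢; omega)]
        simp [phi_single r l h_ h1 h2]
      · obtain ⟨hh0, hml, hmu, hpl, hpr⟩ := pvPre_children r l h_ hpt h1 h2
        rw [phiAltGo_cons2 f r l h_ st ans h1 h2,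
            ih ((r, max r (l - pvPow2 h_), h_ - 1) :: (max r (l - pvPow2 h_) + 1, l, h_ - 1) :: st)
              (ans ++ [max r (l - pvPow2 h_)])
              (by intro t ht
                  simp only [List.mem_cons] at ht
                  rcases ht with rfl | rfl | ht
                  · exact hpl
                  · exact hpr
                  · exact hok' t ht)
              (by simp only [List.map_cons, List.sum_cons, pvCost] at hc ⊢; omega)]
        simp only [List.map_cons, List.flatten_cons]
        rw [phi_unfold r l h_ hpt h1 h2]
        simp [List.append_assoc]

-- ===== VERDICT (by name: the statement is the Claim_ definition above) =====
theorem phi_spec : Claim_equal_phi := by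
  intro r l h_ _ hpre
  unfold Spec_phi phi_alt
  rw [phiAltGo_eq (2 * (l - r).toNat + 2) [(r, l, h_)] []
      (by intro t ht; simp only [List.mem_cons, List.not_mem_nil, or_false] at ht; subst ht; exact hpre)
      (by simp [pvCost])]
  simp
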